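-- pv_equiv track=rewrite | github.com/Distracted-E421/Project-Datapunk | datapunk/containers/lake/src/query/executor/windows.py | process_partition
-- ===== SOURCE A (Python) =====
-- from typing import Any, Dict, Iterator, List, Optional, Tuple
--
-- def process_partition(partition: List[Dict[str, Any]],
--                      order_by: Optional[List[str]] = None) -> List[int]:
--     if not order_by:
--         return [1] * len(partition)
--
--     sorted_partition = sorted(
--         enumerate(partition),
--         key=lambda x: tuple(x[1][col] for col in order_by)
--     )
--
--     ranks = [0] * len(partition)
--     current_rank = 1
--     current_values = None
--
--     for orig_idx, row in sorted_partition: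
--         values = tuple(row[col] for col in order_by)
--         if values != current_values:
--             current_values = values
--             current_rank += 1
--         ranks[orig_idx] = current_rank
--
--     return ranks
-- ===== SOURCE B (Python) =====
-- def process_partition(partition, order_by=None):
--     if not order_by:
--         return [1] * len(partition)
--     keys = [tuple(row[col] for col in order_by) for row in partition]
--     rank_map = {k: r for r, k in enumerate(sorted(set(keys)), start=2)}
--     return [rank_map[k] for k in keys]
-- ===== Notes on version B (the rewrite author's own statement) =====
-- stated objective: alternative
-- what changed: A sorts the whole enumerated partition and scans it with a running rank/previous-key state writing into a preallocated array; B instead deduplicates the key tuples, sorts only the distinct keys, builds a key-to-rank dictionary (starting at 2, matching A's start-at-1-then-bump behaviour), and maps it over the rows.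
import Mathlib
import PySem

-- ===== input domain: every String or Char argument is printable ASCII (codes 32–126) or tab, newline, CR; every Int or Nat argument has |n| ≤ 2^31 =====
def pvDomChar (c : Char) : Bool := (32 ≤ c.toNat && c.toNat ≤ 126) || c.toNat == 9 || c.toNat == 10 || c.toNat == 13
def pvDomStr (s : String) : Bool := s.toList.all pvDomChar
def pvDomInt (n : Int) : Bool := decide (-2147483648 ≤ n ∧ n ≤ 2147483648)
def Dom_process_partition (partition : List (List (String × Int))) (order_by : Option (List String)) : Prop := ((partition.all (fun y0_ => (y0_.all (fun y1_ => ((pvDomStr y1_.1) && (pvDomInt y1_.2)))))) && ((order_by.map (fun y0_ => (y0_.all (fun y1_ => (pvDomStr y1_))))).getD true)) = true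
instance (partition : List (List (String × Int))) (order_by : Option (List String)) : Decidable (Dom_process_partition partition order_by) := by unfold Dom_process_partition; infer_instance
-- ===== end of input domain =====

-- B replaces A's sort-the-whole-partition-and-scan with: dedup the key tuples, sort only the
-- distinct keys, build a rank dictionary, map it back over the rows (alternative decomposition).

-- ===== PORT A =====
-- tuple(row[col] for col in order_by); row[col] is a dict lookup (KeyError excluded by Pre_,
-- so the `.getD 0` default is never reached on admitted inputs)
def pvKey (row : List (String × Int)) (ob : List String) : List Int :=
  ob.map (fun col => ((PySem.Dict.mk row).get? col).getD 0)

def process_partition (partition : List (List (String × Int))) (order_by : Option (List String)) : List Int :=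
  let ob := order_by.getD []
  if ob = [] then List.replicate partition.length 1
  else
    let sortedPartition := PySem.List.sorted (PySem.List.enumerate partition) (fun x => pvKey x.2 ob) false
    let fin := sortedPartition.foldl
      (fun (st : List Int × Int × Option (List Int)) p =>
        let values := pvKey p.2 ob
        let rc : Int × Option (List Int) :=
          if some values ≠ st.2.2 then (st.2.1 + 1, some values) else (st.2.1, st.2.2)
        (PySem.List.pySetD st.1 p.1 rc.1, rc))
      (List.replicate partition.length 0, 1, none)
    fin.1

-- ===== PORT B =====
def process_partition_alt (partition : List (List (String × Int))) (order_by : Option (List String)) : List Int :=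
  let ob := order_by.getD []
  if ob = [] then List.replicate partition.length 1
  else
    let keys := partition.map (fun row => pvKey row ob)
    let distinct := PySem.List.sorted (PySem.Set.ofList keys) (fun k => k) false
    let rankMap : PySem.Dict (List Int) Int :=
      (PySem.List.enumerate distinct 2).foldl (fun d p => d.insert p.2 p.1) PySem.Dict.empty
    -- rank_map[k]; k is always a key of rank_map, so the `.getD 0` default is never reached
    keys.map (fun k => (rankMap.get? k).getD 0)

-- ===== PRECONDITION & SPEC =====
-- Pre_ excludes exactly the inputs where A raises KeyError: some order_by column missing from some row.
def Pre_process_partition (partition : List (List (String × Int))) (order_by : Option (List String)) : Prop :=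
  ∀ row ∈ partition, ∀ col ∈ order_by.getD [], (PySem.Dict.mk row).contains col = true
instance (partition : List (List (String × Int))) (order_by : Option (List String)) : Decidable (Pre_process_partition partition order_by) := by unfold Pre_process_partition; infer_instance

def pvWitness_process_partition : (List (List (String × Int))) × Option (List String) :=
  ([[("a", 3)], [("a", 1)], [("a", 3)]], some ["a"])

def Spec_process_partition (partition : List (List (String × Int))) (order_by : Option (List String)) (out : List Int) : Prop := out = process_partition_alt partition order_by
instance (partition : List (List (String × Int))) (order_by : Option (List String)) (out : List Int) : Decidable (Spec_process_partition partition order_by out) := by unfold Spec_process_partition; infer_instance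

-- ===== CLAIM (what is proved, stated in full; the proofs are below) =====
def Claim_equal_process_partition : Prop := ∀ (partition : List (List (String × Int))) (order_by : Option (List String)), Dom_process_partition partition order_by → Pre_process_partition partition order_by → Spec_process_partition partition order_by (process_partition partition order_by)

-- ===== LEMMAS AND PROOFS =====


def pvCnt (keys : List (List Int)) (k : List Int) : Int :=
  ((PySem.Set.ofList keys).countP (fun k' => decide (k' < k)) : Int)

lemma pv_countP_le_split (l : List (List Int)) (v : List Int) :
    l.countP (fun x => decide (x ≤ v)) = l.countP (fun x => decide (x < v)) + l.count v := by
  induction l with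
  | nil => rfl
  | cons a t ih =>
    rcases lt_trichotomy a v with h | h | h <;>
      simp [List.countP_cons, List.count_cons, ih, h, le_of_lt, ne_of_lt, ne_of_gt,
        not_lt_of_gt, le_of_eq, lt_irrefl] <;> omega

lemma pv_cnt_zero (keys : List (List Int)) (k : List Int)
    (h : ∀ k' ∈ keys, ¬ k' < k) : pvCnt keys k = 0 := by
  unfold pvCnt
  have h0 : (PySem.Set.ofList keys).countP (fun k' => decide (k' < k)) = 0 := by
    rw [List.countP_eq_zero]
    intro x hx
    simpa using h x ((PySem.Set.mem_ofList _ _).1 hx)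
  simp [h0]

lemma pv_cnt_succ (keys : List (List Int)) (v k : List Int)
    (hv : v ∈ keys) (hvk : v < k) (hcov : ∀ k' ∈ keys, k' < k → k' ≤ v) :
    pvCnt keys k = pvCnt keys v + 1 := by
  unfold pvCnt
  have hcongr : (PySem.Set.ofList keys).countP (fun k' => decide (k' < k))
      = (PySem.Set.ofList keys).countP (fun k' => decide (k' ≤ v)) := by
    apply List.countP_congr
    intro x hx
    have hxk : x ∈ keys := (PySem.Set.mem_ofList _ _).1 hx
    constructor
    · intro h; exact decide_eq_true (hcov x hxk (of_decide_eq_true h))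
    · intro h; exact decide_eq_true (lt_of_le_of_lt (of_decide_eq_true h) hvk)
  have hsplit := pv_countP_le_split (PySem.Set.ofList keys) v
  have hcount : (PySem.Set.ofList keys).count v = 1 :=
    List.count_eq_one_of_mem (PySem.Set.nodup_ofList keys) ((PySem.Set.mem_ofList _ _).2 hv)
  rw [hcongr, hsplit, hcount]
  push_cast
  ring

lemma pv_countP_lt_getElem (l : List (List Int)) (hl : l.Pairwise (· < ·)) :
    ∀ j, (hj : j < l.length) → l.countP (fun x => decide (x < l[j])) = j := by
  induction l with
  | nil => intro j hj; simp at hj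
  | cons a t ih =>
    rcases List.pairwise_cons.1 hl with ⟨ha, ht⟩
    intro j hj
    cases j with
    | zero =>
      simp only [List.getElem_cons_zero, List.countP_cons]
      have h0 : t.countP (fun x => decide (x < a)) = 0 := by
        rw [List.countP_eq_zero]
        intro x hx
        simp [not_lt_of_gt (ha x hx)]
      simp [h0]
      exact fun x hx => le_of_lt (ha x hx)
    | succ j =>
      have hjt : j < t.length := by simpa using hj
      have hc : a < t[j] := ha _ (List.getElem_mem hjt)
      simp only [List.getElem_cons_succ, List.countP_cons]
      simp [hc]
      exact ih ht j hjt

lemma pv_foldA_inv (ob : List String) (keys : List (List Int)) :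
    ∀ (S : List (Int × List (String × Int))) (rk : List Int) (r : Int) (cur : Option (List Int)),
    S.Pairwise (fun a b => pvKey a.2 ob ≤ pvKey b.2 ob) →
    (∀ p ∈ S, pvKey p.2 ob ∈ keys) →
    ((cur = none ∧ r = 1 ∧ ∀ k' ∈ keys, ∃ p ∈ S, pvKey p.2 ob = k')
      ∨ (∃ v, cur = some v ∧ v ∈ keys ∧ r = 2 + pvCnt keys v
          ∧ (∀ p ∈ S, v ≤ pvKey p.2 ob)
          ∧ (∀ k' ∈ keys, k' ≤ v ∨ ∃ p ∈ S, pvKey p.2 ob = k'))) →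
    (S.foldl
      (fun (st : List Int × Int × Option (List Int)) p =>
        let values := pvKey p.2 ob
        let rc : Int × Option (List Int) :=
          if some values ≠ st.2.2 then (st.2.1 + 1, some values) else (st.2.1, st.2.2)
        (PySem.List.pySetD st.1 p.1 rc.1, rc)) (rk, r, cur)).1
    = S.foldl (fun rk p => PySem.List.pySetD rk p.1 (2 + pvCnt keys (pvKey p.2 ob))) rk := by
  intro S
  induction S with
  | nil => intro rk r cur _ _ _; rfl
  | cons p T ih =>
    intro rk r cur hsorted hmem hinv
    rcases List.pairwise_cons.1 hsorted with ⟨hple, hT⟩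
    have hkmem : pvKey p.2 ob ∈ keys := hmem p (List.mem_cons_self ..)
    rcases hinv with ⟨hcur, hr, hcov⟩ | ⟨v, hcur, hvmem, hr, hvle, hcov⟩
    · -- cur = none: rank bumps to 2, cnt = 0
      have hk0 : pvCnt keys (pvKey p.2 ob) = 0 := by
        apply pv_cnt_zero
        intro k' hk'
        rcases hcov k' hk' with ⟨q, hq, hqk⟩
        rcases List.mem_cons.1 hq with rfl | hq'
        · exact hqk ▸ lt_irrefl _
        · exact not_lt_of_ge (hqk ▸ hple q hq')
      have hne : some (pvKey p.2 ob) ≠ cur := by simp [hcur]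
      simp only [List.foldl_cons, if_pos hne]
      rw [ih _ _ _ hT (fun q hq => hmem q (List.mem_cons_of_mem _ hq))]
      · rw [hr, hk0]; norm_num
      · right
        refine ⟨pvKey p.2 ob, rfl, hkmem, by rw [hr, hk0]; ring, hple, ?_⟩
        intro k' hk'
        rcases hcov k' hk' with ⟨q, hq, hqk⟩
        rcases List.mem_cons.1 hq with rfl | hq'
        · exact Or.inl (le_of_eq hqk.symm)
        · exact Or.inr ⟨q, hq', hqk⟩
    · by_cases hsame : pvKey p.2 ob = v
      · -- same key group: rank unchanged
        have hne : ¬ (some (pvKey p.2 ob) ≠ cur) := by simp [hcur, hsame]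
        simp only [List.foldl_cons, if_neg hne]
        rw [ih _ _ _ hT (fun q hq => hmem q (List.mem_cons_of_mem _ hq))]
        · rw [hr, hsame]
        · right
          refine ⟨v, hcur, hvmem, hr, fun q hq => ?_, ?_⟩
          · exact hvle q (List.mem_cons_of_mem _ hq)
          · intro k' hk'
            rcases hcov k' hk' with h | ⟨q, hq, hqk⟩
            · exact Or.inl h
            · rcases List.mem_cons.1 hq with rfl | hq'
              · exact Or.inl (by rw [← hqk, hsame])
              · exact Or.inr ⟨q, hq', hqk⟩
      · -- new key group: rank bumps, cnt increases by one
        have hvlt : v < pvKey p.2 ob :=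
          lt_of_le_of_ne (hvle p (List.mem_cons_self ..)) (Ne.symm hsame)
        have hkcnt : pvCnt keys (pvKey p.2 ob) = pvCnt keys v + 1 := by
          apply pv_cnt_succ keys v _ hvmem hvlt
          intro k' hk' hlt
          rcases hcov k' hk' with h | ⟨q, hq, hqk⟩
          · exact h
          · rcases List.mem_cons.1 hq with rfl | hq'
            · exact absurd (hqk ▸ hlt) (lt_irrefl _)
            · exact absurd (lt_of_lt_of_le hlt (hqk ▸ hple q hq')) (lt_irrefl _)
        have hne : some (pvKey p.2 ob) ≠ cur := by simp [hcur, hsame]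
        simp only [List.foldl_cons, if_pos hne]
        rw [ih _ _ _ hT (fun q hq => hmem q (List.mem_cons_of_mem _ hq))]
        · rw [hr, hkcnt]; ring_nf
        · right
          refine ⟨pvKey p.2 ob, rfl, hkmem, by rw [hr, hkcnt]; ring, hple, ?_⟩
          intro k' hk'
          rcases hcov k' hk' with h | ⟨q, hq, hqk⟩
          · exact Or.inl (le_of_lt (lt_of_le_of_lt h hvlt))
          · rcases List.mem_cons.1 hq with rfl | hq'
            · exact Or.inl (le_of_eq hqk.symm)
            · exact Or.inr ⟨q, hq', hqk⟩

lemma pv_foldl_set_full (partition : List (List (String × Int))) (G : List (String × Int) → Int) :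
    ∀ (S : List (Int × List (String × Int))),
    (∀ p ∈ S, ∃ k : Nat, ∃ h : k < partition.length, p = ((k : Int), partition[k])) →
    (S.map (·.1)).Nodup →
    ∀ rk : List Int, rk.length = partition.length →
    (∀ j : Nat, j < partition.length → (¬ ∃ p ∈ S, p.1 = (j : Int)) → rk[j]? = (partition.map G)[j]?) →
    S.foldl (fun rk p => PySem.List.pySetD rk p.1 (G p.2)) rk = partition.map G := by
  intro S
  induction S with
  | nil =>
    intro _ _ rk hlen hagree
    simp only [List.foldl_nil]
    apply List.ext_getElem?
    intro j
    by_cases hj : j < partition.length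
    · simpa using hagree j hj (by simp)
    · rw [List.getElem?_eq_none, List.getElem?_eq_none]
      · simpa using hj
      · omega
  | cons p T ih =>
    intro hidx hnodup rk hlen hagree
    rcases hidx p (List.mem_cons_self ..) with ⟨k, hk, hpk⟩
    have hnodup' : (p.1 :: T.map (·.1)).Nodup := by simpa using hnodup
    have hnd := List.nodup_cons.1 hnodup'
    simp only [List.foldl_cons]
    apply ih (fun q hq => hidx q (List.mem_cons_of_mem _ hq)) hnd.2
    · rw [hpk]
      simp [PySem.List.pySetD_natCast, hlen]
    · intro j hj hnc
      rw [hpk]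
      simp only [PySem.List.pySetD_natCast]
      by_cases hjk : j = k
      · subst hjk
        rw [List.getElem?_set_self (by omega), List.getElem?_map]
        simp [hpk, List.getElem?_eq_getElem hj]
      · rw [List.getElem?_set_ne (by omega)]
        apply hagree j hj
        rintro ⟨q, hq, hq1⟩
        rcases List.mem_cons.1 hq with rfl | hq'
        · have : (j : Int) = (k : Int) := by simpa [hpk] using hq1.symm
          exact hjk (by exact_mod_cast this)
        · exact hnc ⟨q, hq', hq1⟩

lemma pv_declt_eq : (fun (a b : List Int) => a.decidableLT b)
    = (LinearOrder.toDecidableLT : DecidableLT (List Int)) := by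
  funext a b; exact Subsingleton.elim _ _

lemma pv_sorted_inst {α : Type} (xs : List α) (key : α → List Int) (rev : Bool) :
    @PySem.List.sorted α (List Int) List.instLT (fun a b => a.decidableLT b) xs key rev
    = @PySem.List.sorted α (List Int) List.instLinearOrder.toLT LinearOrder.toDecidableLT xs key rev := by
  rw [pv_declt_eq]

lemma pv_A_main (partition : List (List (String × Int))) (ob : List String) (hob : ¬ ob = []) :
    process_partition partition (some ob)
      = partition.map (fun row => 2 + pvCnt (partition.map (fun r => pvKey r ob)) (pvKey row ob)) := by
  unfold process_partition
  simp only [Option.getD_some, if_neg hob]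
  have hmemE : ∀ p, p ∈ PySem.List.enumerate partition ↔
      ∃ (k : Nat) (h : k < partition.length), p = ((k : Int), partition[k]) := by
    intro p
    rw [PySem.List.mem_enumerate_iff]
    simp
  have hinE : ∀ j : Nat, (h : j < partition.length) →
      ((j : Int), partition[j]) ∈ PySem.List.sorted (PySem.List.enumerate partition)
        (fun x => pvKey x.2 ob) false := by
    intro j h
    rw [PySem.List.mem_sorted]
    exact (hmemE _).2 ⟨j, h, rfl⟩
  have hfold := pv_foldA_inv ob (partition.map (fun r => pvKey r ob))
    (PySem.List.sorted (PySem.List.enumerate partition) (fun x => pvKey x.2 ob) false)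
    (List.replicate partition.length 0) 1 none
    (by rw [pv_sorted_inst]
        exact PySem.List.sorted_pairwise (PySem.List.enumerate partition) (fun x => pvKey x.2 ob))
    (by
      intro p hp
      rcases (hmemE p).1 ((PySem.List.mem_sorted _ _ _ _).1 hp) with ⟨k, hk, rfl⟩
      exact List.mem_map_of_mem (List.getElem_mem hk))
    (Or.inl ⟨rfl, rfl, by
      intro k' hk'
      rcases List.mem_map.1 hk' with ⟨row, hrow, hrk⟩
      rcases List.mem_iff_getElem.1 hrow with ⟨i, hi, rfl⟩
      exact ⟨((i : Int), partition[i]), hinE i hi, hrk⟩⟩)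
  rw [hfold]
  apply pv_foldl_set_full partition
    (fun row => 2 + pvCnt (partition.map (fun r => pvKey r ob)) (pvKey row ob))
  · intro p hp
    exact (hmemE p).1 ((PySem.List.mem_sorted _ _ _ _).1 hp)
  · have hpmap : ((PySem.List.sorted (PySem.List.enumerate partition)
        (fun x => pvKey x.2 ob) false).map (·.1)).Perm
        ((PySem.List.enumerate partition).map (·.1)) :=
      (PySem.List.sorted_perm _ _ _).map _
    rw [hpmap.nodup_iff]
    have hmap : ((PySem.List.enumerate partition).map
        (fun p : Int × List (String × Int) => p.1)).Pairwise (fun a b : Int => a < b) :=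
      List.Pairwise.map _ (fun _ _ h => h)
        (PySem.List.pairwise_lt_enumerate partition 0)
    exact hmap.imp (fun h => ne_of_lt h)
  · exact List.length_replicate
  · intro j hj hnc
    exact absurd ⟨((j : Int), partition[j]), hinE j hj, rfl⟩ hnc

lemma pv_B_main (partition : List (List (String × Int))) (ob : List String) (hob : ¬ ob = []) :
    process_partition_alt partition (some ob)
      = partition.map (fun row => 2 + pvCnt (partition.map (fun r => pvKey r ob)) (pvKey row ob)) := by
  unfold process_partition_alt
  simp only [Option.getD_some, if_neg hob]
  have hperm : (PySem.List.sorted (PySem.Set.ofList (partition.map (fun row => pvKey row ob)))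
      (fun k => k) false).Perm (PySem.Set.ofList (partition.map (fun row => pvKey row ob))) :=
    PySem.List.sorted_perm _ _ _
  have hnd := hperm.nodup_iff.2 (PySem.Set.nodup_ofList (partition.map (fun row => pvKey row ob)))
  have hlt : (PySem.List.sorted (PySem.Set.ofList (partition.map (fun row => pvKey row ob)))
      (fun k => k) false).Pairwise (· < ·) := by
    rw [pv_sorted_inst]
    exact PySem.List.sorted_ofList_pairwise_lt (partition.map (fun row => pvKey row ob))
  have hsnd := PySem.List.map_snd_enumerate (PySem.List.sorted
      (PySem.Set.ofList (partition.map (fun row => pvKey row ob))) (fun k => k) false) 2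
  have hitems := PySem.Dict.items_foldl_insert_fresh
      (l := PySem.List.enumerate (PySem.List.sorted
        (PySem.Set.ofList (partition.map (fun row => pvKey row ob))) (fun k => k) false) 2)
      (fun p => p.2) (fun p => p.1) PySem.Dict.empty
      (by intro a _; exact PySem.Dict.contains_empty _) (by rw [hsnd]; exact hnd)
  simp only [show (PySem.Dict.empty : PySem.Dict (List Int) Int).items = [] from rfl,
    List.nil_append] at hitems
  have hkeysRM : (PySem.Dict.keys ((PySem.List.enumerate (PySem.List.sorted
      (PySem.Set.ofList (partition.map (fun row => pvKey row ob))) (fun k => k) false) 2).foldl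
      (fun (d : PySem.Dict (List Int) Int) p => d.insert p.2 p.1) PySem.Dict.empty))
      = PySem.List.sorted (PySem.Set.ofList (partition.map (fun row => pvKey row ob)))
        (fun k => k) false := by
    show (PySem.Dict.items _).map (·.1) = _
    rw [hitems, List.map_map]
    exact hsnd
  have hget : ∀ k ∈ partition.map (fun row => pvKey row ob),
      ((PySem.Dict.get? ((PySem.List.enumerate (PySem.List.sorted
        (PySem.Set.ofList (partition.map (fun row => pvKey row ob))) (fun k => k) false) 2).foldl
        (fun (d : PySem.Dict (List Int) Int) p => d.insert p.2 p.1) PySem.Dict.empty) k)).getD 0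
      = 2 + pvCnt (partition.map (fun row => pvKey row ob)) k := by
    intro k hk
    have hkd : k ∈ PySem.List.sorted (PySem.Set.ofList (partition.map (fun row => pvKey row ob)))
        (fun k => k) false :=
      (PySem.List.mem_sorted _ _ _ _).2 ((PySem.Set.mem_ofList _ _).2 hk)
    rcases List.mem_iff_getElem.1 hkd with ⟨j, hj, hjk⟩
    have hmemItems : (k, (2 + (j : Int))) ∈ PySem.Dict.items ((PySem.List.enumerate
        (PySem.List.sorted (PySem.Set.ofList (partition.map (fun row => pvKey row ob)))
          (fun k => k) false) 2).foldl
        (fun (d : PySem.Dict (List Int) Int) p => d.insert p.2 p.1) PySem.Dict.empty) := by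
      rw [hitems]
      apply List.mem_map.2
      refine ⟨((2 + (j : Int)), k), ?_, rfl⟩
      rw [PySem.List.mem_enumerate_iff]
      exact ⟨j, hj, by rw [hjk]⟩
    have hg := PySem.Dict.get?_of_mem_items _ hmemItems (by rw [hkeysRM]; exact hnd)
    have hcnt : pvCnt (partition.map (fun row => pvKey row ob)) k = (j : Int) := by
      unfold pvCnt
      rw [← hperm.countP_eq, ← hjk, pv_countP_lt_getElem _ hlt j hj]
    rw [hg, hcnt]
    rfl
  rw [List.map_congr_left hget, List.map_map]
  rfl

lemma pv_total_eq (partition : List (List (String × Int))) (order_by : Option (List String)) :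
    process_partition partition order_by = process_partition_alt partition order_by := by
  match order_by with
  | none => rfl
  | some ob =>
    by_cases hob : ob = []
    · subst hob; rfl
    · rw [pv_A_main _ _ hob, pv_B_main _ _ hob]

-- ===== VERDICT (by name: the statement is the Claim_ definition above) =====
theorem process_partition_spec : Claim_equal_process_partition := by
  intro partition order_by _ _
  unfold Spec_process_partition
  exact pv_total_eq partition order_by
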